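-- pv_equiv track=rewrite | github.com/Aionix-Data-Inc/5D-Digital-Data-Storage | src/optical_storage/bit_utils.py | chunk_bits
-- ===== SOURCE A (Python) =====
-- from typing import Iterator, List, Sequence
--
-- def chunk_bits(bits: Sequence[int], size: int, pad: bool = False, pad_value: int = 0) -> Iterator[List[int]]:
--     """Yield fixed-size chunks from *bits*.
--
--     Args:
--         bits: The source sequence of bits.
--         size: The chunk size to yield.
--         pad: When ``True`` the final chunk is padded to ``size`` with ``pad_value``.
--         pad_value: The value to use for padding bits.
--
--     Yields:
--         A list of bits with length ``size`` (last chunk may be shorter when ``pad``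
--         is ``False``).
--     """
--
--     if size <= 0:
--         raise ValueError("size must be greater than zero")
--
--     accumulator: List[int] = []
--     for bit in bits:
--         accumulator.append(bit & 0x1)
--         if len(accumulator) == size:
--             yield accumulator
--             accumulator = []
--
--     if accumulator:
--         if pad:
--             accumulator.extend([pad_value & 0x1] * (size - len(accumulator)))
--             yield accumulator
--         elif not pad:
--             yield accumulator
-- ===== SOURCE B (Python) =====
-- def chunk_bits(bits, size, pad=False, pad_value=0):
--     """Yield fixed-size chunks from *bits* by slicing a pre-masked list."""
--     if size <= 0:
--         raise ValueError("size must be greater than zero")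
--     rest = [b & 0x1 for b in bits]
--     while rest:
--         chunk, rest = rest[:size], rest[size:]
--         if pad and len(chunk) < size:
--             chunk = chunk + [pad_value & 0x1] * (size - len(chunk))
--         yield chunk
-- ===== Notes on version B (the rewrite author's own statement) =====
-- stated objective: alternative
-- what changed: Replaces A's element-by-element accumulator with a counter reset by masking the whole sequence once and then repeatedly slicing off size-long prefixes; padding is decided per slice length instead of via leftover loop state. Both are generators; B consumes the input eagerly before yielding (return values identical).
import Mathlib
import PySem

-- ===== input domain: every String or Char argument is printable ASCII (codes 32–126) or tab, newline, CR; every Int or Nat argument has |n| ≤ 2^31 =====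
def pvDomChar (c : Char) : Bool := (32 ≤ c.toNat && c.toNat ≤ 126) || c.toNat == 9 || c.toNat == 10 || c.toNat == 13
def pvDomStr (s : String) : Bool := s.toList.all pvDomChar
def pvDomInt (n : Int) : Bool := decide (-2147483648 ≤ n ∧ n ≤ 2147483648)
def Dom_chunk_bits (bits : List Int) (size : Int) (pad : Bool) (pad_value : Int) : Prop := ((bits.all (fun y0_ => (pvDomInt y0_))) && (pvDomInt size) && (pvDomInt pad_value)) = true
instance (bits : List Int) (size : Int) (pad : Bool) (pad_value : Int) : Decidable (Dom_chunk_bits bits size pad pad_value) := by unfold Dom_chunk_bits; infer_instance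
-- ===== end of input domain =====

-- B masks the whole sequence once and repeatedly slices off size-long prefixes, padding per slice
-- length, instead of A's element-by-element accumulator; return values (as lists) are identical.
-- Both Pythons are generators; B consumes its input eagerly before the first yield.

-- ===== PORT A =====
-- A's loop: append bit & 1 to an accumulator, yield and reset when it reaches `size`;
-- final non-empty accumulator is yielded, padded with pad_value & 1 when `pad`.
def chunkAGo (size : Int) (pad : Bool) (pad_value : Int) : List Int → List Int → List (List Int)
  | [], acc =>
      if acc ≠ [] then
        if pad then [acc ++ List.replicate (size - (acc.length : Int)).toNat (PySem.Int.mod pad_value 2)]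
        else [acc]
      else []
  | b :: rest, acc =>
      let acc' := acc ++ [PySem.Int.mod b 2]
      if (acc'.length : Int) = size then acc' :: chunkAGo size pad pad_value rest []
      else chunkAGo size pad pad_value rest acc'

def chunk_bits (bits : List Int) (size : Int) (pad : Bool) (pad_value : Int) : List (List Int) :=
  chunkAGo size pad pad_value bits []

-- ===== PORT B =====
-- B's while loop: rest[:size] / rest[size:] slicing on the pre-masked list (size ≥ 1 under Pre_,
-- so rest[:size] = take, rest[size:] = drop; written on the tail so recursion is structural).
def altGo (s : Nat) (pad : Bool) (pad_value : Int) : List Int → List (List Int)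
  | [] => []
  | b :: t =>
      let chunk := (b :: t).take s
      let chunk := if pad ∧ chunk.length < s
                   then chunk ++ List.replicate (s - chunk.length) (PySem.Int.mod pad_value 2)
                   else chunk
      chunk :: altGo s pad pad_value (t.drop (s - 1))
  termination_by l => l.length
  decreasing_by simp

def chunk_bits_alt (bits : List Int) (size : Int) (pad : Bool) (pad_value : Int) : List (List Int) :=
  altGo size.toNat pad pad_value (bits.map (fun b => PySem.Int.mod b 2))

-- ===== PRECONDITION & SPEC =====
-- Pre_ excludes size ≤ 0, where the Python A raises ValueError (B raises identically).
def Pre_chunk_bits (bits : List Int) (size : Int) (pad : Bool) (pad_value : Int) : Prop := 1 ≤ size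
instance (bits : List Int) (size : Int) (pad : Bool) (pad_value : Int) : Decidable (Pre_chunk_bits bits size pad pad_value) := by unfold Pre_chunk_bits; infer_instance
def pvWitness_chunk_bits : List Int × Int × Bool × Int := ([1, 0, 1], 2, true, 0)

def Spec_chunk_bits (bits : List Int) (size : Int) (pad : Bool) (pad_value : Int) (out : List (List Int)) : Prop := out = chunk_bits_alt bits size pad pad_value
instance (bits : List Int) (size : Int) (pad : Bool) (pad_value : Int) (out : List (List Int)) : Decidable (Spec_chunk_bits bits size pad pad_value out) := by unfold Spec_chunk_bits; infer_instance

-- ===== CLAIM (what is proved, stated in full; the proofs are below) =====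
def Claim_equal_chunk_bits : Prop := ∀ (bits : List Int) (size : Int) (pad : Bool) (pad_value : Int), Dom_chunk_bits bits size pad pad_value → Pre_chunk_bits bits size pad pad_value → Spec_chunk_bits bits size pad pad_value (chunk_bits bits size pad pad_value)

-- ===== LEMMAS AND PROOFS =====

-- altGo on a nonempty list, with s ≥ 1 so the tail step is drop s.
theorem altGo_nil (s : Nat) (pad : Bool) (pv : Int) : altGo s pad pv [] = [] := by
  rw [altGo.eq_def]

theorem altGo_nonempty (s : Nat) (pad : Bool) (pv : Int) (l : List Int) (hl : l ≠ []) (hs : 1 ≤ s) :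
    altGo s pad pv l =
      (if pad ∧ (l.take s).length < s
       then l.take s ++ List.replicate (s - (l.take s).length) (PySem.Int.mod pv 2)
       else l.take s) :: altGo s pad pv (l.drop s) := by
  cases l with
  | nil => exact absurd rfl hl
  | cons b t =>
      have h : t.drop (s - 1) = (b :: t).drop s := by
        cases s with
        | zero => omega
        | succ n => simp
      rw [altGo.eq_def, ← h]

theorem chunkAGo_eq_altGo (size : Int) (pad : Bool) (pv : Int) (hs : 1 ≤ size)
    (m : List Int) (acc : List Int) (hacc : acc.length < size.toNat) :
    chunkAGo size pad pv m acc = altGo size.toNat pad pv (acc ++ m.map (fun b => PySem.Int.mod b 2)) := by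
  induction m generalizing acc with
  | nil =>
      by_cases h : acc = []
      · simp [chunkAGo, h, altGo_nil]
      · rw [List.map_nil, List.append_nil,
            altGo_nonempty _ _ _ _ h (by omega)]
        have htk : acc.take size.toNat = acc := List.take_of_length_le (Nat.le_of_lt hacc)
        have hdp : acc.drop size.toNat = [] := List.drop_of_length_le (Nat.le_of_lt hacc)
        rw [htk, hdp, altGo_nil]
        by_cases hp : pad
        · have h1 : (size - (acc.length : Int)).toNat = size.toNat - acc.length := by omega
          simp [chunkAGo, h, hp, hacc, h1]
        · simp [chunkAGo, h, hp, hacc]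
  | cons b rest ih =>
      simp only [chunkAGo]
      set acc' := acc ++ [PySem.Int.mod b 2] with hacc'
      have hlen' : acc'.length = acc.length + 1 := by simp [hacc']
      have hm : acc ++ (b :: rest).map (fun b => PySem.Int.mod b 2)
              = acc' ++ rest.map (fun b => PySem.Int.mod b 2) := by
        simp [hacc']
      by_cases hfull : (acc'.length : Int) = size
      · have hsl : acc'.length = size.toNat := by omega
        rw [if_pos hfull, hm,
            altGo_nonempty _ _ _ _ (by simp [hacc']) (by omega)]
        have htake : (acc' ++ rest.map (fun b => PySem.Int.mod b 2)).take size.toNat = acc' := by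
          rw [← hsl]; simp
        have hdrop : (acc' ++ rest.map (fun b => PySem.Int.mod b 2)).drop size.toNat
                   = rest.map (fun b => PySem.Int.mod b 2) := by
          rw [← hsl]; simp
        rw [htake, hdrop, ih [] (by simp only [List.length_nil]; omega)]
        have hno : ¬ (pad = true ∧ acc'.length < size.toNat) := by omega
        rw [if_neg hno]
        simp
      · have hlt : acc'.length < size.toNat := by omega
        rw [if_neg hfull, ih acc' hlt, hm]

-- ===== VERDICT (by name: the statement is the Claim_ definition above) =====
theorem chunk_bits_spec : Claim_equal_chunk_bits := by
  intro bits size pad pv _ hpre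
  unfold Spec_chunk_bits chunk_bits chunk_bits_alt
  exact chunkAGo_eq_altGo size pad pv hpre bits [] (by have h1 : 1 ≤ size := hpre; simp; omega)
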